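-- pv_equiv track=rewrite | github.com/flamesdestoy/cursedCanvas | system_core/front_use/console_wind/console_p/window_core/utils/buffers_utils.py | validate_grid
-- ===== SOURCE A (Python) =====
-- def validate_grid(grid: list[list[str]]) -> bool:
--     """
--     Checks if the passed in grid is consistent, in a rectangular shape.
--
--     The function sees if the passed in grid is a rectangle by checking the length of rows and the length
--     of columns is the same length of columns in all of the rows.
--
--     Args:
--         grid (list[list[str]]): A nested arrays storing characters.
--
--     Returns:
--         bool: A true or false value is outputed.
--     """
--
--     if not grid:
--         return True  # An empty grid is considered valid
--
--     first_row_length = len(grid[0])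
--     for row in grid[1:]:  # Start iterating from the second row
--         if len(row) != first_row_length:
--             return False
--     return True
-- ===== SOURCE B (Python) =====
-- def validate_grid(grid: list[list[str]]) -> bool:
--     """Rectangular iff there is at most one distinct row length."""
--     return len({len(row) for row in grid}) <= 1
-- ===== Notes on version B (the rewrite author's own statement) =====
-- stated objective: idiomatic
-- what changed: B collects the set of distinct row lengths in one comprehension and checks its size is at most 1, instead of comparing each row's length to the first row's with an early-exit loop.
import Mathlib
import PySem

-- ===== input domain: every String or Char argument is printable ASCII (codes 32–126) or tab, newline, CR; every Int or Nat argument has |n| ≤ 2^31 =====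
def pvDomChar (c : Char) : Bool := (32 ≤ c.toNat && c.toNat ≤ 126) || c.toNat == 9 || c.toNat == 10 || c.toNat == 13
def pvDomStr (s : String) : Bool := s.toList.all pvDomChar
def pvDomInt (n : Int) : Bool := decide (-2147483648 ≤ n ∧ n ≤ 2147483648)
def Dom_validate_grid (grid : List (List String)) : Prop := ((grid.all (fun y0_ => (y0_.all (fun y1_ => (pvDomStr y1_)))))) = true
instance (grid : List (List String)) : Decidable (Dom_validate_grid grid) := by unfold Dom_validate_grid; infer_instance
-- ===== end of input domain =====

-- ===== PORT A =====
-- B is a set-of-lengths reformulation of A's compare-to-first loop; same return value everywhere.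
-- loop over grid[1:], returning false on the first mismatching row length (early return)
def validate_grid_loop (firstLen : Nat) : List (List String) → Bool
  | [] => true
  | row :: rest => if row.length ≠ firstLen then false else validate_grid_loop firstLen rest

def validate_grid (grid : List (List String)) : Bool :=
  match grid with
  | [] => true  -- An empty grid is considered valid
  | first :: _ =>
    validate_grid_loop first.length (PySem.List.slice grid (some 1) none)

-- ===== PORT B =====
def validate_grid_alt (grid : List (List String)) : Bool :=
  decide ((PySem.Set.ofList (grid.map (fun row => row.length))).length ≤ 1)

-- ===== PRECONDITION & SPEC =====
def Spec_validate_grid (grid : List (List String)) (out : Bool) : Prop := out = validate_grid_alt grid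
instance (grid : List (List String)) (out : Bool) : Decidable (Spec_validate_grid grid out) := by unfold Spec_validate_grid; infer_instance

-- ===== CLAIM (what is proved, stated in full; the proofs are below) =====
def Claim_equal_validate_grid : Prop := ∀ (grid : List (List String)), Dom_validate_grid grid → Spec_validate_grid grid (validate_grid grid)

-- ===== LEMMAS AND PROOFS =====

-- ===== VERDICT (by name: the statement is the Claim_ definition above) =====
-- the early-exit loop over the tail checks exactly "every tail row has the first row's length"
lemma loop_eq_all (fl : Nat) (l : List (List String)) :
    validate_grid_loop fl l = l.all (fun row => row.length == fl) := by
  induction l with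
  | nil => rfl
  | cons r t ih =>
    simp [validate_grid_loop, List.all_cons, ih]
    by_cases h : r.length = fl <;> simp [h]

-- a Nodup list whose elements all equal a has at most one element
lemma nodup_const_len_le_one (a : Nat) (s : List Nat) (hn : s.Nodup)
    (h : ∀ x ∈ s, x = a) : s.length ≤ 1 := by
  match s with
  | [] => simp
  | [x] => simp
  | x :: y :: t =>
    have hx : x = a := h x (by simp)
    have hy : y = a := h y (by simp)
    simp [List.nodup_cons] at hn
    exact absurd (hx.trans hy.symm) (fun he => hn.1.1 he)

-- any two members of a list of length ≤ 1 are equal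
lemma mem_len_le_one {x a : Nat} {s : List Nat} (h : s.length ≤ 1)
    (hx : x ∈ s) (ha : a ∈ s) : x = a := by
  match s with
  | [] => simp at hx
  | [y] => simp at hx ha; omega
  | y :: z :: t => simp at h

-- the distinct-lengths set of a nonempty grid has size ≤ 1 iff every row matches the head
lemma set_le_one_iff (a : Nat) (l : List Nat) :
    ((PySem.Set.ofList (a :: l)).length ≤ 1) ↔ (∀ x ∈ l, x = a) := by
  constructor
  · intro h x hx
    have hmem : x ∈ PySem.Set.ofList (a :: l) := by
      rw [PySem.Set.mem_ofList]; simp [hx]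
    have hamem : a ∈ PySem.Set.ofList (a :: l) := by
      rw [PySem.Set.mem_ofList]; simp
    exact mem_len_le_one h hmem hamem
  · intro h
    apply nodup_const_len_le_one a _ (PySem.Set.nodup_ofList _)
    intro x hx
    rw [PySem.Set.mem_ofList] at hx
    rcases List.mem_cons.mp hx with h1 | h2
    · exact h1
    · exact h x h2

theorem validate_grid_spec : Claim_equal_validate_grid := by
  intro grid _
  unfold Spec_validate_grid
  cases grid with
  | nil => rfl
  | cons first rest =>
    have hslice : PySem.List.slice (first :: rest) (some 1) none = rest := by
      simp [PySem.List.slice_from]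
    simp only [validate_grid, validate_grid_alt, hslice, loop_eq_all, List.map_cons]
    by_cases h : (PySem.Set.ofList (first.length :: rest.map (fun row => row.length))).length ≤ 1
    · have hall := (set_le_one_iff _ _).mp h
      simp only [h, decide_true]
      simp only [List.all_eq_true, beq_iff_eq]
      intro r hr
      exact hall r.length (List.mem_map_of_mem hr)
    · rw [set_le_one_iff] at h
      push_neg at h
      obtain ⟨x, hx, hne⟩ := h
      obtain ⟨r, hr, rfl⟩ := List.mem_map.mp hx
      simp only [set_le_one_iff]
      have hfalse : (rest.all fun row => row.length == first.length) = false := by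
        rw [List.all_eq_false]
        exact ⟨r, hr, by simp [hne]⟩
      have hdec : decide (∀ x ∈ List.map (fun (row : List String) => row.length) rest, x = first.length) = false := by
        simp only [decide_eq_false_iff_not]
        intro hc
        exact hne (hc r.length (List.mem_map_of_mem hr))
      rw [hfalse, hdec]
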